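-- pv_equiv track=rewrite | github.com/tomfluff/UTokyo_CI_Entrance_Exam | 2017-Summer/q_05.py | get_horizontal_idxs
-- ===== SOURCE A (Python) =====
-- def get_horizontal_idxs(lines,v_idxs):
--     h_idxs = []
--     for s,e in v_idxs:
--         s_i = e_i = 0
--         for l in lines:
--             if l[s:e].strip() != '':
--                 e_i += 1
--             if l[s:e].strip() == '' or e_i == len(lines):
--                 if s_i < e_i:
--                     h_idxs.append((s_i,e_i))
--                 s_i = e_i + 1
--                 e_i = s_i
--     return h_idxs
-- ===== SOURCE B (Python) =====
-- def get_horizontal_idxs(lines, v_idxs):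
--     h_idxs = []
--     for s, e in v_idxs:
--         idxs = [i for i, l in enumerate(lines) if l[s:e].strip() != '']
--         run = None  # (start, prev) of the current maximal consecutive run
--         for i in idxs:
--             if run is not None and i == run[1] + 1:
--                 run = (run[0], i)
--             else:
--                 if run is not None:
--                     h_idxs.append((run[0], run[1] + 1))
--                 run = (i, i)
--         if run is not None:
--             h_idxs.append((run[0], run[1] + 1))
--     return h_idxs
-- ===== Notes on version B (the rewrite author's own statement) =====
-- stated objective: alternative
-- what changed: Replaces A's per-line counter state machine (s_i/e_i with an end-of-list flush condition) by a two-phase pass: first collect the indices of non-empty rows with enumerate, then group maximal runs of consecutive indices into half-open intervals.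
import Mathlib
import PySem

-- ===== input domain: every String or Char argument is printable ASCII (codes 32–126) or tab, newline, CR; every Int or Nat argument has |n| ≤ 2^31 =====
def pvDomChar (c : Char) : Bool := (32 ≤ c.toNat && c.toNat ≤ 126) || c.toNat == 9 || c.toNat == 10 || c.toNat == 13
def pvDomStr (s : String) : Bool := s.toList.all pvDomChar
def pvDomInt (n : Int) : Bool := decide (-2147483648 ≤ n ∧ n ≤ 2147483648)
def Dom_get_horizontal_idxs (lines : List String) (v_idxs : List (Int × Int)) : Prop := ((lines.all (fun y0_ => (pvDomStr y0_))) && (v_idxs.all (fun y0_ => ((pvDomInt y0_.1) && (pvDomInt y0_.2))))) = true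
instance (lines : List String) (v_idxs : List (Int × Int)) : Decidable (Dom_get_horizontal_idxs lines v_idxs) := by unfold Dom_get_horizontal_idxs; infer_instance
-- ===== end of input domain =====

-- B replaces A's per-line counter state machine by collect-non-empty-row-indices-then-group-consecutive-runs;
-- same asymptotic cost (the cell test is evaluated once per line instead of twice); proved to return the identical interval list.

-- l[s:e].strip() != ''  (the cell test both Python versions write verbatim)
def pvCell (l : String) (s e : Int) : Bool :=
  decide (PySem.Chars.strip (PySem.Chars.slice l.toList (some s) (some e)) ≠ [])

-- ===== PORT A =====
def get_horizontal_idxs (lines : List String) (v_idxs : List (Int × Int)) : List (Int × Int) :=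
  v_idxs.foldl (fun h_idxs se =>
    (lines.foldl (fun (st : List (Int × Int) × Int × Int) l =>
        let e_i : Int := if pvCell l se.1 se.2 then st.2.2 + 1 else st.2.2
        if (!pvCell l se.1 se.2) || e_i == (lines.length : Int) then
          ((if st.2.1 < e_i then st.1 ++ [(st.2.1, e_i)] else st.1), e_i + 1, e_i + 1)
        else
          (st.1, st.2.1, e_i))
      (h_idxs, 0, 0)).1) []

-- ===== PORT B =====
-- [i for i, l in enumerate(lines) if l[s:e].strip() != '']
def pvNonEmptyIdxs (s e : Int) : List String → Int → List Int
  | [], _ => []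
  | l :: rest, i =>
      if pvCell l s e then i :: pvNonEmptyIdxs s e rest (i + 1)
      else pvNonEmptyIdxs s e rest (i + 1)

-- one step of B's grouping loop: state = (h_idxs, run)
def pvGroupStep (st : List (Int × Int) × Option (Int × Int)) (i : Int) : List (Int × Int) × Option (Int × Int) :=
  match st.2 with
  | some (a, p) => if i == p + 1 then (st.1, some (a, i)) else (st.1 ++ [(a, p + 1)], some (i, i))
  | none => (st.1, some (i, i))

-- final 'if run is not None: h_idxs.append(...)'
def pvGroupFlush (st : List (Int × Int) × Option (Int × Int)) : List (Int × Int) :=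
  match st.2 with
  | some (a, p) => st.1 ++ [(a, p + 1)]
  | none => st.1

def get_horizontal_idxs_alt (lines : List String) (v_idxs : List (Int × Int)) : List (Int × Int) :=
  v_idxs.foldl (fun h_idxs se =>
    pvGroupFlush ((pvNonEmptyIdxs se.1 se.2 lines 0).foldl pvGroupStep (h_idxs, none))) []

-- ===== PRECONDITION & SPEC =====
def Spec_get_horizontal_idxs (lines : List String) (v_idxs : List (Int × Int)) (out : List (Int × Int)) : Prop := out = get_horizontal_idxs_alt lines v_idxs
instance (lines : List String) (v_idxs : List (Int × Int)) (out : List (Int × Int)) : Decidable (Spec_get_horizontal_idxs lines v_idxs out) := by unfold Spec_get_horizontal_idxs; infer_instance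

-- ===== CLAIM (what is proved, stated in full; the proofs are below) =====
def Claim_equal_get_horizontal_idxs : Prop := ∀ (lines : List String) (v_idxs : List (Int × Int)), Dom_get_horizontal_idxs lines v_idxs → Spec_get_horizontal_idxs lines v_idxs (get_horizontal_idxs lines v_idxs)

-- ===== LEMMAS AND PROOFS =====

-- A's inner loop, abstracted to the list of boolean cell tests
def pvAgo (n : Int) (bs : List Bool) (st : List (Int × Int) × Int × Int) : List (Int × Int) :=
  (bs.foldl (fun st b =>
      let e_i : Int := if b then st.2.2 + 1 else st.2.2
      if (!b) || e_i == n then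
        ((if st.2.1 < e_i then st.1 ++ [(st.2.1, e_i)] else st.1), e_i + 1, e_i + 1)
      else
        (st.1, st.2.1, e_i))
    st).1

-- indices of true entries, offset by i (B's index list, abstracted)
def pvIdxs : List Bool → Int → List Int
  | [], _ => []
  | b :: bs, i => if b then i :: pvIdxs bs (i + 1) else pvIdxs bs (i + 1)

-- B's inner loop on the abstracted data
def pvBgo (bs : List Bool) (i : Int) (st : List (Int × Int) × Option (Int × Int)) : List (Int × Int) :=
  pvGroupFlush ((pvIdxs bs i).foldl pvGroupStep st)

lemma pvNonEmptyIdxs_eq (s e : Int) :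
    ∀ (lines : List String) (i : Int),
      pvNonEmptyIdxs s e lines i = pvIdxs (lines.map (fun l => pvCell l s e)) i := by
  intro lines
  induction lines with
  | nil => intro i; rfl
  | cons l rest ih =>
      intro i
      simp only [pvNonEmptyIdxs, pvIdxs, List.map_cons, ih]

lemma pvIdxs_ge : ∀ (bs : List Bool) (i j : Int), j ∈ pvIdxs bs i → i ≤ j := by
  intro bs
  induction bs with
  | nil => intro i j h; simp [pvIdxs] at h
  | cons b bs ih =>
      intro i j h
      by_cases hb : b = true <;>
        simp [pvIdxs, hb] at h
      · rcases h with h | h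
        · omega
        · have := ih (i + 1) j h; omega
      · have := ih (i + 1) j h; omega

-- a stale open run (prev + 1 smaller than every upcoming index) behaves like an already-flushed run
lemma pvBgo_stale (bs : List Bool) (i : Int) (acc : List (Int × Int)) (a p : Int)
    (h : p + 1 < i) :
    pvBgo bs i (acc, some (a, p)) = pvBgo bs i (acc ++ [(a, p + 1)], none) := by
  unfold pvBgo
  cases hx : pvIdxs bs i with
  | nil => simp [pvGroupFlush]
  | cons j t =>
      have hj : i ≤ j := pvIdxs_ge bs i j (by rw [hx]; exact List.mem_cons_self)
      have hne : (j == p + 1) = false := beq_eq_false_iff_ne.mpr (by omega)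
      simp [List.foldl_cons, pvGroupStep, hne]

-- the heart: A's state machine equals B's grouping pass, in both machine states
lemma pv_main (n : Int) : ∀ (bs : List Bool) (i : Int), i + (bs.length : Int) = n →
    (∀ acc, pvAgo n bs (acc, i, i) = pvBgo bs i (acc, none)) ∧
    (∀ acc k, k < i → i < n → pvAgo n bs (acc, k, i) = pvBgo bs i (acc, some (k, i - 1))) := by
  intro bs
  induction bs with
  | nil =>
      intro i hn
      refine ⟨fun acc => by simp [pvAgo, pvBgo, pvIdxs, pvGroupFlush], fun acc k hk hi => ?_⟩
      exfalso; simp at hn; omega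
  | cons b bs ih =>
      intro i hn
      have hn' : (i + 1) + (bs.length : Int) = n := by simp at hn ⊢; omega
      have ihc := (ih (i + 1) hn').1
      have iho := (ih (i + 1) hn').2
      have hlen : (bs.length : Int) = n - i - 1 := by simp at hn; omega
      constructor
      · intro acc
        by_cases hb : b = true
        · subst hb
          by_cases hend : (i + 1 : Int) = n
          · have hbs : bs = [] := by
              have : (bs.length : Int) = 0 := by omega
              simpa using this
            subst hbs
            simp [pvAgo, pvBgo, pvIdxs, pvGroupStep, pvGroupFlush, hend]
            omega
          · have h1 : ((i + 1 : Int) == n) = false := by simp [hend]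
            have hA : pvAgo n (true :: bs) (acc, i, i) = pvAgo n bs (acc, i, i + 1) := by
              simp [pvAgo, hend]
            have hB : pvBgo (true :: bs) i (acc, none) = pvBgo bs (i + 1) (acc, some (i, i)) := by
              simp [pvBgo, pvIdxs, pvGroupStep]
            rw [hA, hB]
            have := iho acc i (by omega) (by omega)
            simpa using this
        · have hb' : b = false := by simpa using hb
          subst hb'
          have hA : pvAgo n (false :: bs) (acc, i, i) = pvAgo n bs (acc, i + 1, i + 1) := by
            simp [pvAgo]
          have hB : pvBgo (false :: bs) i (acc, none) = pvBgo bs (i + 1) (acc, none) := by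
            simp [pvBgo, pvIdxs]
          rw [hA, hB, ihc acc]
      · intro acc k hk hi
        by_cases hb : b = true
        · subst hb
          by_cases hend : (i + 1 : Int) = n
          · have hbs : bs = [] := by
              have : (bs.length : Int) = 0 := by omega
              simpa using this
            subst hbs
            simp [pvAgo, pvBgo, pvIdxs, pvGroupStep, pvGroupFlush, hend]
            omega
          · have h1 : ((i + 1 : Int) == n) = false := by simp [hend]
            have hA : pvAgo n (true :: bs) (acc, k, i) = pvAgo n bs (acc, k, i + 1) := by
              simp [pvAgo, hend]
            have hc : ((i : Int) == i - 1 + 1) = true := by simp only [beq_iff_eq]; omega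
            have hB : pvBgo (true :: bs) i (acc, some (k, i - 1)) = pvBgo bs (i + 1) (acc, some (k, i)) := by
              simp [pvBgo, pvIdxs, pvGroupStep, beq_iff_eq.mpr (show (i:Int) = i - 1 + 1 by omega)]
            rw [hA, hB]
            have := iho acc k (by omega) (by omega)
            simpa using this
        · have hb' : b = false := by simpa using hb
          subst hb'
          have hA : pvAgo n (false :: bs) (acc, k, i) = pvAgo n bs (acc ++ [(k, i)], i + 1, i + 1) := by
            simp [pvAgo, hk]
          have hB : pvBgo (false :: bs) i (acc, some (k, i - 1)) = pvBgo bs (i + 1) (acc, some (k, i - 1)) := by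
            simp [pvBgo, pvIdxs]
          have hstale : pvBgo bs (i + 1) (acc, some (k, i - 1)) =
              pvBgo bs (i + 1) (acc ++ [(k, i - 1 + 1)], none) :=
            pvBgo_stale bs (i + 1) acc k (i - 1) (by omega)
          rw [hA, hB, hstale, show (i : Int) - 1 + 1 = i by omega, ihc]

-- A's inner fold over lines is pvAgo on the mapped boolean list
lemma pvA_inner (lines : List String) (s e : Int) (acc : List (Int × Int)) :
    (lines.foldl (fun (st : List (Int × Int) × Int × Int) l =>
        let e_i : Int := if pvCell l s e then st.2.2 + 1 else st.2.2
        if (!pvCell l s e) || e_i == (lines.length : Int) then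
          ((if st.2.1 < e_i then st.1 ++ [(st.2.1, e_i)] else st.1), e_i + 1, e_i + 1)
        else
          (st.1, st.2.1, e_i))
      (acc, 0, 0)).1
    = pvAgo (lines.length : Int) (lines.map (fun l => pvCell l s e)) (acc, 0, 0) := by
  unfold pvAgo
  rw [List.foldl_map]

theorem pv_inner_eq (lines : List String) (s e : Int) (acc : List (Int × Int)) :
    (lines.foldl (fun (st : List (Int × Int) × Int × Int) l =>
        let e_i : Int := if pvCell l s e then st.2.2 + 1 else st.2.2
        if (!pvCell l s e) || e_i == (lines.length : Int) then
          ((if st.2.1 < e_i then st.1 ++ [(st.2.1, e_i)] else st.1), e_i + 1, e_i + 1)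
        else
          (st.1, st.2.1, e_i))
      (acc, 0, 0)).1
    = pvGroupFlush ((pvNonEmptyIdxs s e lines 0).foldl pvGroupStep (acc, none)) := by
  rw [pvA_inner, pvNonEmptyIdxs_eq]
  have h := (pv_main (lines.length : Int) (lines.map (fun l => pvCell l s e)) 0 (by simp)).1 acc
  rw [h]; rfl

-- ===== VERDICT (by name: the statement is the Claim_ definition above) =====
theorem get_horizontal_idxs_spec : Claim_equal_get_horizontal_idxs := by
  intro lines v_idxs _
  unfold Spec_get_horizontal_idxs get_horizontal_idxs get_horizontal_idxs_alt
  apply PySem.List.foldl_congr_mem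
  intro acc se _
  exact pv_inner_eq lines se.1 se.2 acc
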